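-- pv_equiv track=rewrite | github.com/danielagoncalves12/2048-game | j2048_motor_48579.py | somar_esquerda
-- ===== SOURCE A (Python) =====
-- def somar_esquerda(uma_lista):
--
--     resultado = []
--     indice = 0
--     pontos = 0
--     while indice < len(uma_lista)-1:
--
--         if uma_lista[indice] == uma_lista[indice+1]:
--             soma = uma_lista[indice] + uma_lista[indice+1]
--             resultado.append(soma)
--             indice = indice + 2
--             pontos = pontos + soma
--         else:
--             resultado.append(uma_lista[indice])
--             indice = indice + 1
--
--     if indice == len(uma_lista)-1:
--         resultado.append(uma_lista[indice])
--
--     while len(resultado) != len(uma_lista):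
--         resultado.append(0)
--
--     return (resultado , pontos)
-- ===== SOURCE B (Python) =====
-- def somar_esquerda(uma_lista):
--     resultado = []
--     pontos = 0
--     just_merged = False
--     for x in uma_lista:
--         if resultado and resultado[-1] == x and not just_merged:
--             resultado[-1] += x
--             pontos += resultado[-1]
--             just_merged = True
--         else:
--             resultado.append(x)
--             just_merged = False
--     resultado += [0] * (len(uma_lista) - len(resultado))
--     return (resultado, pontos)
-- ===== Notes on version B (the rewrite author's own statement) =====
-- stated objective: idiomatic
-- what changed: Replaced the index-based while loop with an advance-by-2 step by a single for-each pass maintaining a stack with a just_merged lock, and replaced the padding while loop by one list-multiplication extension.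
import Mathlib
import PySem

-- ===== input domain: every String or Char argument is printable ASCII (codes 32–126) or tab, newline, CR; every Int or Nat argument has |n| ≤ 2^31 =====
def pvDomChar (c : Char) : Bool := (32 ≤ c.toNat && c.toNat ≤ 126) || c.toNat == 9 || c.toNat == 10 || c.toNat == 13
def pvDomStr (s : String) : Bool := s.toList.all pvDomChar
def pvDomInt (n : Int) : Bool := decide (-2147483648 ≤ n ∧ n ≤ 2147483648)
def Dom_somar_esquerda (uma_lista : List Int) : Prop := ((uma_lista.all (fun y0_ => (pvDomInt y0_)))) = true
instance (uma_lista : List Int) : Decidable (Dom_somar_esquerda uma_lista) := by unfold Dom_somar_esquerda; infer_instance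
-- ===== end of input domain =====

-- B replaces A's index-stepping while loop by a single for-each pass with a just_merged stack lock (idiomatic; same O(n) cost).

-- ===== PORT A =====
-- the while loop, with fuel (the loop advances indice by ≥ 1 per iteration, so length+1 fuel suffices);
-- the trailing `if indice == len-1` test is performed where the loop exits
def somar_esquerda_loop (uma_lista : List Int) : Nat → List Int → Int → Int → List Int × Int
  | 0, resultado, _, pontos => (resultado, pontos)
  | fuel + 1, resultado, indice, pontos =>
    if indice < (uma_lista.length : Int) - 1 then
      if (PySem.List.pyGet? uma_lista indice).getD 0 = (PySem.List.pyGet? uma_lista (indice + 1)).getD 0 then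
        let soma := (PySem.List.pyGet? uma_lista indice).getD 0 + (PySem.List.pyGet? uma_lista (indice + 1)).getD 0
        somar_esquerda_loop uma_lista fuel (resultado ++ [soma]) (indice + 2) (pontos + soma)
      else
        somar_esquerda_loop uma_lista fuel (resultado ++ [(PySem.List.pyGet? uma_lista indice).getD 0]) (indice + 1) pontos
    else
      (if indice = (uma_lista.length : Int) - 1 then resultado ++ [(PySem.List.pyGet? uma_lista indice).getD 0] else resultado, pontos)

-- the padding while loop, with fuel (resultado never exceeds the input length, so length+1 fuel suffices)
def somar_esquerda_pad (n : Nat) : Nat → List Int → List Int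
  | 0, resultado => resultado
  | fuel + 1, resultado => if resultado.length = n then resultado else somar_esquerda_pad n fuel (resultado ++ [0])

def somar_esquerda (uma_lista : List Int) : List Int × Int :=
  let r := somar_esquerda_loop uma_lista (uma_lista.length + 1) [] 0 0
  (somar_esquerda_pad uma_lista.length (uma_lista.length + 1) r.1, r.2)

-- ===== PORT B =====
-- the for-each loop of Source B; the Python list `resultado` used as a stack is represented
-- reversed (head = top, i.e. Python's resultado[-1]), and reversed back at the end
def somar_esquerda_alt_loop : List Int → List Int → Int → Bool → List Int × Int
  | [], stack, pontos, _ => (stack, pontos)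
  | x :: rest, stack, pontos, just_merged =>
    match stack, just_merged with
    | t :: r, false =>
      if t = x then somar_esquerda_alt_loop rest ((t + x) :: r) (pontos + (t + x)) true
      else somar_esquerda_alt_loop rest (x :: t :: r) pontos false
    | s, _ => somar_esquerda_alt_loop rest (x :: s) pontos false

def somar_esquerda_alt (uma_lista : List Int) : List Int × Int :=
  let r := somar_esquerda_alt_loop uma_lista [] 0 false
  (r.1.reverse ++ List.replicate (uma_lista.length - r.1.length) 0, r.2)

-- ===== PRECONDITION & SPEC =====
def Spec_somar_esquerda (uma_lista : List Int) (out : List Int × Int) : Prop := out = somar_esquerda_alt uma_lista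
instance (uma_lista : List Int) (out : List Int × Int) : Decidable (Spec_somar_esquerda uma_lista out) := by unfold Spec_somar_esquerda; infer_instance

-- ===== CLAIM (what is proved, stated in full; the proofs are below) =====
def Claim_equal_somar_esquerda : Prop := ∀ (uma_lista : List Int), Dom_somar_esquerda uma_lista → Spec_somar_esquerda uma_lista (somar_esquerda uma_lista)

-- ===== LEMMAS AND PROOFS =====

-- common characterisation: merged list and score of a run
def mergeF : List Int → List Int × Int
  | [] => ([], 0)
  | [x] => ([x], 0)
  | x :: y :: t =>
    if x = y then ((x + y) :: (mergeF t).1, (mergeF t).2 + (x + y))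
    else (x :: (mergeF (y :: t)).1, (mergeF (y :: t)).2)

theorem mergeF_len : ∀ (l : List Int), (mergeF l).1.length ≤ l.length := by
  intro l
  fun_induction mergeF l <;> simp_all <;> omega

theorem stepB_true (x : Int) (rest stack : List Int) (s : Int) :
    somar_esquerda_alt_loop (x :: rest) stack s true
      = somar_esquerda_alt_loop rest (x :: stack) s false := by
  cases stack <;> rfl

theorem loopB_spec : ∀ (n : Nat) (l : List Int), l.length ≤ n → ∀ (r : List Int) (s : Int),
    somar_esquerda_alt_loop l r s true = ((mergeF l).1.reverse ++ r, s + (mergeF l).2) := by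
  intro n
  induction n with
  | zero =>
    intro l h r s
    have : l = [] := by cases l <;> simp_all
    subst this
    simp [somar_esquerda_alt_loop, mergeF]
  | succ n ih =>
    intro l h r s
    match l with
    | [] => simp [somar_esquerda_alt_loop, mergeF]
    | [x] =>
      rw [stepB_true]
      simp [somar_esquerda_alt_loop, mergeF]
    | x :: y :: t =>
      have ht : t.length ≤ n := by simp at h; omega
      have h2 : (y :: t).length ≤ n := by simp at h ⊢; omega
      rw [stepB_true]
      by_cases hxy : x = y
      · rw [show somar_esquerda_alt_loop (y :: t) (x :: r) s false
              = somar_esquerda_alt_loop t ((x + y) :: r) (s + (x + y)) true by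
            simp [somar_esquerda_alt_loop, hxy]]
        rw [ih t ht]
        simp only [mergeF, if_pos hxy, List.reverse_cons, List.append_assoc]
        refine Prod.ext ?_ ?_ <;> simp <;> omega
      · rw [show somar_esquerda_alt_loop (y :: t) (x :: r) s false
              = somar_esquerda_alt_loop t (y :: x :: r) s false by
            simp [somar_esquerda_alt_loop]
            intro h'; exact absurd h' hxy]
        rw [← stepB_true, ih (y :: t) h2]
        simp [mergeF, hxy, List.append_assoc]

theorem loopB_init (l : List Int) :
    somar_esquerda_alt_loop l [] 0 false = ((mergeF l).1.reverse, (mergeF l).2) := by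
  match l with
  | [] => simp [somar_esquerda_alt_loop, mergeF]
  | x :: rest =>
    rw [show somar_esquerda_alt_loop (x :: rest) [] 0 false
          = somar_esquerda_alt_loop rest (x :: []) 0 false from rfl,
        ← stepB_true, loopB_spec (x :: rest).length (x :: rest) le_rfl]
    simp

theorem loopA_spec : ∀ (fuel : Nat) (l : List Int) (i : Int) (res : List Int) (p : Int),
    0 ≤ i → i ≤ l.length → l.length + 1 ≤ fuel + i.toNat →
    somar_esquerda_loop l fuel res i p =
      (res ++ (mergeF (l.drop i.toNat)).1, p + (mergeF (l.drop i.toNat)).2) := by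
  intro fuel
  induction fuel with
  | zero => intro l i res p h0 hle hf; omega
  | succ fuel ih =>
    intro l i res p h0 hle hf
    by_cases hlt : i < (l.length : Int) - 1
    · have hi1 : i.toNat + 1 < l.length := by omega
      have hi : i.toNat < l.length := by omega
      have gx : PySem.List.pyGet? l i = some l[i.toNat] :=
        PySem.List.pyGet?_eq_some_getElem l h0 (by omega)
      have gy : PySem.List.pyGet? l (i + 1) = some l[i.toNat + 1] := by
        rw [PySem.List.pyGet?_eq_some_getElem l (by omega) (by omega)]
        exact congrArg some (getElem_congr rfl (by omega) (by omega))
      have hd : l.drop i.toNat = l[i.toNat] :: l[i.toNat + 1] :: l.drop (i.toNat + 2) := by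
        rw [List.drop_eq_getElem_cons hi, List.drop_eq_getElem_cons hi1]
      by_cases heq : l[i.toNat] = l[i.toNat + 1]
      · rw [show somar_esquerda_loop l (fuel + 1) res i p
              = somar_esquerda_loop l fuel (res ++ [l[i.toNat] + l[i.toNat + 1]]) (i + 2)
                  (p + (l[i.toNat] + l[i.toNat + 1])) by
            simp [somar_esquerda_loop, hlt, gx, gy, heq]]
        rw [ih l (i + 2) _ _ (by omega) (by omega) (by omega)]
        have h2 : (i + 2).toNat = i.toNat + 2 := by omega
        rw [h2, hd]
        simp only [mergeF, if_pos heq, List.append_assoc]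
        refine Prod.ext ?_ ?_ <;> simp <;> omega
      · rw [show somar_esquerda_loop l (fuel + 1) res i p
              = somar_esquerda_loop l fuel (res ++ [l[i.toNat]]) (i + 1) p by
            simp [somar_esquerda_loop, hlt, gx, gy, heq]]
        rw [ih l (i + 1) _ _ (by omega) (by omega) (by omega)]
        rw [show (i + 1).toNat = i.toNat + 1 from by omega, hd, List.drop_eq_getElem_cons hi1] 
        simp [mergeF, heq, List.append_assoc]
    · by_cases heq : i = (l.length : Int) - 1
      · have hlen : 1 ≤ l.length := by omega
        have hi' : i.toNat < l.length := by omega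
        have gx : PySem.List.pyGet? l i = some l[i.toNat] :=
          PySem.List.pyGet?_eq_some_getElem l h0 (by omega)
        have hd : l.drop i.toNat = [l[i.toNat]] := by
          rw [List.drop_eq_getElem_cons hi', List.drop_eq_nil_iff.mpr (by omega)]
        have e1 : somar_esquerda_loop l (fuel + 1) res i p
            = (res ++ [(PySem.List.pyGet? l i).getD 0], p) := by
          unfold somar_esquerda_loop
          rw [if_neg hlt, if_pos heq]
        rw [e1, gx, hd]
        simp [mergeF]
      · have hi : i.toNat = l.length := by omega
        rw [show somar_esquerda_loop l (fuel + 1) res i p = (res, p) by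
              simp [somar_esquerda_loop, hlt, heq]]
        rw [hi, List.drop_length]
        simp [mergeF]

theorem pad_spec : ∀ (fuel n : Nat) (res : List Int),
    res.length ≤ n → n ≤ fuel + res.length →
    somar_esquerda_pad n fuel res = res ++ List.replicate (n - res.length) 0 := by
  intro fuel
  induction fuel with
  | zero =>
    intro n res h1 h2
    have : res.length = n := by omega
    simp [somar_esquerda_pad, this]
  | succ fuel ih =>
    intro n res h1 h2
    by_cases heq : res.length = n
    · simp [somar_esquerda_pad, heq]
    · rw [show somar_esquerda_pad n (fuel + 1) res = somar_esquerda_pad n fuel (res ++ [0]) by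
            simp [somar_esquerda_pad, heq]]
      rw [ih n (res ++ [0]) (by simp; omega) (by simp; omega)]
      have : n - res.length = (n - (res ++ [0]).length) + 1 := by simp; omega
      rw [this, List.replicate_succ, List.append_assoc]
      simp

-- ===== VERDICT (by name: the statement is the Claim_ definition above) =====
theorem somar_esquerda_spec : Claim_equal_somar_esquerda := by
  intro l _
  unfold Spec_somar_esquerda somar_esquerda somar_esquerda_alt
  rw [loopA_spec (l.length + 1) l 0 [] 0 le_rfl (by simp) (by omega)]
  rw [loopB_init]
  simp only [Int.toNat_zero, List.drop_zero, List.nil_append, List.reverse_reverse,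
    List.length_reverse, zero_add]
  rw [pad_spec (l.length + 1) l.length (mergeF l).1 (mergeF_len l) (by omega)]
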